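-- pv_equiv track=rewrite | github.com/gustin33/project_euler | 001-100/78_coin_partitions.py | partition_function
-- ===== SOURCE A (Python) =====
-- def partition_function(limit, modulo):
--     # Array to store partition numbers p(n)
--     partitions = [0] * (limit + 1)
--     partitions[0] = 1  # p(0) = 1
--
--     pentagonal = lambda k: k * (3 * k - 1) // 2  # Generalized pentagonal number formula
--
--     for n in range(1, limit + 1):
--         total = 0
--         k = 1
--         sign = 1  # Alternates between + and -
--
--         while True:
--             pent_k = pentagonal(k)
--             if pent_k > n:
--                 break
--             total += sign * partitions[n - pent_k]
--
--             pent_neg_k = pentagonal(-k)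
--             if pent_neg_k > n:
--                 break
--             total += sign * partitions[n - pent_neg_k]
--
--             sign *= -1
--             k += 1
--
--         partitions[n] = total % modulo  # Modulo to avoid large numbers
--
--         if partitions[n] == 0:
--             return n
--
--     return -1  # If no such n is found within the limit
-- ===== SOURCE B (Python) =====
-- def partition_function(limit, modulo):
--     # Scatter-style pentagonal sieve: once p(src) is final, push its signed
--     # contributions forward; pending[n] then already holds the whole recurrence
--     # sum for n when the outer loop reaches it (no value array, no inner gather).
--     pending = [0] * (limit + 1)
--
--     def scatter(src, val):
--         k, sign, g = 1, 1, 1          # g = k*(3k-1)//2, maintained incrementally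
--         while src + g <= limit:
--             pending[src + g] += sign * val
--             h = g + k                  # k*(3k+1)//2
--             if src + h <= limit:
--                 pending[src + h] += sign * val
--             g += 3 * k + 1
--             sign = -sign
--             k += 1
--
--     scatter(0, 1)
--     for n in range(1, limit + 1):
--         v = pending[n] % modulo
--         if v == 0:
--             return n
--         scatter(n, v)
--     return -1
-- ===== Notes on version B (the rewrite author's own statement) =====
-- stated objective: alternative
-- what changed: B reverses the data flow of the recurrence DP: instead of A's gather loop that, for each n, re-generates pentagonal offsets and sums signed values out of a stored array of partition residues, B keeps only a pending-contributions array and, each time a residue is finished, scatters its signed contribution forward into pending[src+g]; pending[n] is already the complete recurrence sum when the outer loop reaches it, so no value array and no inner gather sum exist.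
import Mathlib
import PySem

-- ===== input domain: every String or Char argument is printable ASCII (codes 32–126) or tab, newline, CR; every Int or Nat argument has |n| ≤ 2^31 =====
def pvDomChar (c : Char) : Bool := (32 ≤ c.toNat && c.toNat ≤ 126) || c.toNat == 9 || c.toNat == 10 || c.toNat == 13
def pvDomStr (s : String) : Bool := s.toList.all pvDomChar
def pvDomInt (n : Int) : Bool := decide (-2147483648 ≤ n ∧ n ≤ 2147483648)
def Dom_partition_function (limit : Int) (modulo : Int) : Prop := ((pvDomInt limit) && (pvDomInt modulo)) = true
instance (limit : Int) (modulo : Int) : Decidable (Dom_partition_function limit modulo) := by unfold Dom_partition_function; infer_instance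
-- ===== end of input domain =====

-- B reverses the data flow of the pentagonal recurrence: instead of gathering the signed
-- recurrence sum for each n from an array of stored partition values, it scatters each
-- finished value forward into a pending-contributions array (objective: alternative; same cost).

-- ===== PORT A =====
-- pentagonal = lambda k: k * (3 * k - 1) // 2
def pvPentA (k : Int) : Int := PySem.Int.floordiv (k * (3 * k - 1)) 2

-- k*(3k-1) is even, so the floor division is exact (cited by proofs and termination)
theorem pvPentA_half (k : Int) : k * (3 * k - 1) = 2 * pvPentA k := by
  have h : ∃ t : Int, k * (3 * k - 1) = 2 * t := by
    rcases Int.even_or_odd k with ⟨m, hm⟩ | ⟨m, hm⟩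
    · exact ⟨m * (3 * k - 1), by subst hm; ring⟩
    · exact ⟨k * (3 * m + 1), by subst hm; ring⟩
  obtain ⟨t, ht⟩ := h
  have : pvPentA k = t := by
    unfold pvPentA
    rw [ht, PySem.Int.floordiv_eq_ediv_of_pos (by norm_num)]
    omega
  omega

theorem pvPentA_succ (k : Int) : pvPentA (k + 1) = pvPentA k + 3 * k + 1 := by
  have h1 := pvPentA_half k
  have h2 := pvPentA_half (k + 1)
  nlinarith [h1, h2]

-- A's inner `while True:` loop; the Nat j encodes Python's k = j + 1 (k starts at 1, steps by 1)
def pvAWhile (parts : List Int) (n : Int) (total : Int) (sign : Int) (j : Nat) : Int :=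
  let k : Int := (j : Int) + 1
  let pent_k := pvPentA k
  if pent_k > n then total
  else
    let total1 := total + sign * PySem.List.pyGetD parts (n - pent_k) 0
    let pent_neg_k := pvPentA (-k)
    if pent_neg_k > n then total1
    else
      let total2 := total1 + sign * PySem.List.pyGetD parts (n - pent_neg_k) 0
      pvAWhile parts n total2 (sign * -1) (j + 1)
  termination_by (n + 1 - pvPentA ((j : Int) + 1)).toNat
  decreasing_by
    have h := pvPentA_succ ((j : Int) + 1)
    have hb : pvPentA k = pvPentA ((j : Int) + 1) := rfl
    push_cast
    omega

-- A's `for n in range(1, limit+1)` loop over the preallocated array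
def pvALoop (limit : Int) (modulo : Int) (parts : List Int) (n : Int) : Int :=
  if n > limit then -1
  else
    let total := pvAWhile parts n 0 1 0
    let parts2 := PySem.List.pySetD parts n (PySem.Int.mod total modulo)
    if PySem.List.pyGetD parts2 n 0 == 0 then n
    else pvALoop limit modulo parts2 (n + 1)
  termination_by (limit + 1 - n).toNat
  decreasing_by omega

def partition_function (limit : Int) (modulo : Int) : Int :=
  -- partitions = [0] * (limit + 1); partitions[0] = 1
  pvALoop limit modulo
    (PySem.List.pySetD (List.replicate (limit + 1).toNat 0) 0 1) 1

-- ===== PORT B =====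
-- B's `scatter(src, val)` while loop: pushes sign*val into pending[src+g] for every
-- generalized pentagonal offset g with src+g <= limit; g = k*(3k-1)//2 kept incrementally
def pvScatter (limit : Int) (pending : List Int) (src : Int) (val : Int) (sign : Int) (g : Int) (j : Nat) : List Int :=
  let k : Int := (j : Int) + 1
  if src + g ≤ limit then
    let p1 := PySem.List.pySetD pending (src + g)
                (PySem.List.pyGetD pending (src + g) 0 + sign * val)
    let h := g + k
    let p2 := if src + h ≤ limit then
                PySem.List.pySetD p1 (src + h) (PySem.List.pyGetD p1 (src + h) 0 + sign * val)
              else p1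
    pvScatter limit p2 src val (-sign) (g + 3 * k + 1) (j + 1)
  else pending
  termination_by (limit + 1 - src - g).toNat
  decreasing_by
    push_cast
    omega

-- B's `for n in range(1, limit+1)` loop over the pending-contributions array
def pvBLoop (limit : Int) (modulo : Int) (pending : List Int) (n : Int) : Int :=
  if n > limit then -1
  else
    let v := PySem.Int.mod (PySem.List.pyGetD pending n 0) modulo
    if v == 0 then n
    else pvBLoop limit modulo (pvScatter limit pending n v 1 1 0) (n + 1)
  termination_by (limit + 1 - n).toNat
  decreasing_by omega

def partition_function_alt (limit : Int) (modulo : Int) : Int :=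
  -- pending = [0] * (limit + 1); scatter(0, 1); then the main loop from n = 1
  pvBLoop limit modulo
    (pvScatter limit (List.replicate (limit + 1).toNat 0) 0 1 1 1 0) 1

-- ===== PRECONDITION & SPEC =====
-- Pre_ excludes exactly the inputs where Python A raises: limit < 0 (IndexError on
-- partitions[0] of an empty list) and modulo = 0 with limit ≥ 1 (ZeroDivisionError).
def Pre_partition_function (limit : Int) (modulo : Int) : Prop :=
  0 ≤ limit ∧ (modulo ≠ 0 ∨ limit = 0)
instance (limit : Int) (modulo : Int) : Decidable (Pre_partition_function limit modulo) := by
  unfold Pre_partition_function; infer_instance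

def pvWitness_partition_function : Int × Int := (6, 4)


def Spec_partition_function (limit : Int) (modulo : Int) (out : Int) : Prop :=
  out = partition_function_alt limit modulo
instance (limit : Int) (modulo : Int) (out : Int) : Decidable (Spec_partition_function limit modulo out) := by
  unfold Spec_partition_function; infer_instance

-- ===== CLAIM (what is proved, stated in full; the proofs are below) =====
def Claim_equal_partition_function : Prop :=
  ∀ (limit : Int) (modulo : Int), Dom_partition_function limit modulo →
    Pre_partition_function limit modulo →
    Spec_partition_function limit modulo (partition_function limit modulo)


-- ===== LEMMAS AND PROOFS =====

theorem pvPentA_one : pvPentA 1 = 1 := by decide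

theorem pvPentA_ge_one (j : Nat) : 1 ≤ pvPentA ((j : Int) + 1) := by
  induction j with
  | zero => simp [pvPentA_one]
  | succ i ih =>
      have h := pvPentA_succ ((i : Int) + 1)
      push_cast
      omega

theorem pvPentA_neg_eq (k : Int) :
    pvPentA (-k) = PySem.Int.floordiv (k * (3 * k + 1)) 2 := by
  unfold pvPentA
  congr 1
  ring

theorem pvPentA_neg_val (k : Int) : pvPentA (-k) = pvPentA k + k := by
  have h1 := pvPentA_half k
  have h2 := pvPentA_half (-k)
  nlinarith [h1, h2]

def pvSgn (j : Nat) : Int := if j % 2 = 0 then 1 else -1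

theorem pvSgn_eq (j : Nat) :
    (if PySem.Int.mod ((j : Int) + 1) 2 == 0 then (-1 : Int) else 1) = pvSgn j := by
  rw [PySem.Int.mod_eq_emod_of_pos (by norm_num)]
  by_cases h : j % 2 = 0
  · have h1 : ((j : Int) + 1) % 2 = 1 := by omega
    simp [h1, pvSgn, h]
  · have h1 : ((j : Int) + 1) % 2 = 0 := by omega
    simp [h1, pvSgn, h]

theorem pvSgn_succ (j : Nat) : pvSgn j * -1 = pvSgn (j + 1) := by
  unfold pvSgn
  by_cases h : j % 2 = 0
  · have h1 : ¬ (j + 1) % 2 = 0 := by omega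
    simp [h, h1]
  · have h1 : (j + 1) % 2 = 0 := by omega
    simp [h, h1]

-- ghost list of the generalized pentagonal offsets ≤ limit with their signs (proof-side only)
def pvPentsLoop (limit : Int) (acc : List (Int × Int)) (j : Nat) : List (Int × Int) :=
  let k : Int := (j : Int) + 1
  if PySem.Int.floordiv (k * (3 * k - 1)) 2 > limit then acc
  else
    let s : Int := if PySem.Int.mod k 2 == 0 then -1 else 1
    let acc1 := acc ++ [(PySem.Int.floordiv (k * (3 * k - 1)) 2, s)]
    let acc2 := if PySem.Int.floordiv (k * (3 * k + 1)) 2 ≤ limit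
                then acc1 ++ [(PySem.Int.floordiv (k * (3 * k + 1)) 2, s)]
                else acc1
    pvPentsLoop limit acc2 (j + 1)
  termination_by (limit + 1 - PySem.Int.floordiv (((j : Int) + 1) * (3 * ((j : Int) + 1) - 1)) 2).toNat
  decreasing_by
    have h := pvPentA_succ ((j : Int) + 1)
    have e1 : pvPentA ((j : Int) + 1)
        = PySem.Int.floordiv (((j : Int) + 1) * (3 * ((j : Int) + 1) - 1)) 2 := rfl
    have e2 : pvPentA (((j : Int) + 1) + 1)
        = PySem.Int.floordiv ((((j : Int) + 1) + 1) * (3 * (((j : Int) + 1) + 1) - 1)) 2 := rfl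
    have hb : PySem.Int.floordiv (k * (3 * k - 1)) 2
        = PySem.Int.floordiv (((j : Int) + 1) * (3 * ((j : Int) + 1) - 1)) 2 := rfl
    rw [e1, e2] at h
    push_cast
    omega

theorem pvPentsLoop_acc (limit : Int) :
    ∀ (m : Nat) (acc : List (Int × Int)) (j : Nat),
      (limit + 1 - pvPentA ((j : Int) + 1)).toNat ≤ m →
      pvPentsLoop limit acc j = acc ++ pvPentsLoop limit [] j := by
  intro m
  induction m with
  | zero =>
      intro acc j hm
      have hb : PySem.Int.floordiv (((j : Int) + 1) * (3 * ((j : Int) + 1) - 1)) 2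
          = pvPentA ((j : Int) + 1) := rfl
      have h1 : PySem.Int.floordiv (((j : Int) + 1) * (3 * ((j : Int) + 1) - 1)) 2 > limit := by
        omega
      conv_lhs => rw [pvPentsLoop]
      conv_rhs => rw [pvPentsLoop]
      simp only [h1, if_true, ite_true]
      simp
  | succ m ih =>
      intro acc j hm
      by_cases h1 : PySem.Int.floordiv (((j : Int) + 1) * (3 * ((j : Int) + 1) - 1)) 2 > limit
      · conv_lhs => rw [pvPentsLoop]
        conv_rhs => rw [pvPentsLoop]
        simp only [h1, if_true, ite_true]
        simp
      · have hb : PySem.Int.floordiv (((j : Int) + 1) * (3 * ((j : Int) + 1) - 1)) 2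
            = pvPentA ((j : Int) + 1) := rfl
        have hs := pvPentA_succ ((j : Int) + 1)
        have hm' : (limit + 1 - pvPentA (((j + 1 : Nat) : Int) + 1)).toNat ≤ m := by
          push_cast
          omega
        conv_lhs => rw [pvPentsLoop]
        conv_rhs => rw [pvPentsLoop]
        simp only [h1, if_false, ite_false]
        by_cases h2 : PySem.Int.floordiv (((j : Int) + 1) * (3 * ((j : Int) + 1) + 1)) 2 ≤ limit
        · simp only [h2, if_true, ite_true]
          conv_rhs => rw [ih _ _ hm']
          conv_lhs => rw [ih _ _ hm']
          simp
        · simp only [h2, if_false, ite_false]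
          conv_rhs => rw [ih _ _ hm']
          conv_lhs => rw [ih _ _ hm']
          simp

theorem pvPentsLoop_ge (limit : Int) :
    ∀ (m : Nat) (j : Nat),
      (limit + 1 - pvPentA ((j : Int) + 1)).toNat ≤ m →
      ∀ gs ∈ pvPentsLoop limit [] j, pvPentA ((j : Int) + 1) ≤ gs.1 := by
  intro m
  induction m with
  | zero =>
      intro j hm gs hgs
      have hb : PySem.Int.floordiv (((j : Int) + 1) * (3 * ((j : Int) + 1) - 1)) 2
          = pvPentA ((j : Int) + 1) := rfl
      have h1 : PySem.Int.floordiv (((j : Int) + 1) * (3 * ((j : Int) + 1) - 1)) 2 > limit := by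
        omega
      rw [pvPentsLoop] at hgs
      simp only [h1, if_true, ite_true] at hgs
      simp at hgs
  | succ m ih =>
      intro j hm gs hgs
      have hb : PySem.Int.floordiv (((j : Int) + 1) * (3 * ((j : Int) + 1) - 1)) 2
          = pvPentA ((j : Int) + 1) := rfl
      by_cases h1 : PySem.Int.floordiv (((j : Int) + 1) * (3 * ((j : Int) + 1) - 1)) 2 > limit
      · rw [pvPentsLoop] at hgs
        simp only [h1, if_true, ite_true] at hgs
        simp at hgs
      · have hs := pvPentA_succ ((j : Int) + 1)
        have hq := pvPentA_neg_eq ((j : Int) + 1)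
        have hqv := pvPentA_neg_val ((j : Int) + 1)
        have hm' : (limit + 1 - pvPentA (((j + 1 : Nat) : Int) + 1)).toNat ≤ m := by
          push_cast
          omega
        rw [pvPentsLoop] at hgs
        simp only [h1, if_false, ite_false] at hgs
        rw [pvPentsLoop_acc limit m _ _ hm'] at hgs
        obtain ⟨g, sg⟩ := gs
        dsimp only
        by_cases h2 : PySem.Int.floordiv (((j : Int) + 1) * (3 * ((j : Int) + 1) + 1)) 2 ≤ limit
        · simp only [h2, if_true, ite_true, List.nil_append, List.mem_append,
            List.mem_singleton, List.mem_cons, List.not_mem_nil, or_false,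
            Prod.mk.injEq] at hgs
          rcases hgs with (⟨h, _⟩ | ⟨h, _⟩) | h
          · omega
          · omega
          · have := ih (j + 1) hm' (g, sg) h
            dsimp only at this
            push_cast at this
            omega
        · simp only [h2, if_false, ite_false, List.nil_append, List.mem_append,
            List.mem_singleton, List.mem_cons, List.not_mem_nil, or_false,
            Prod.mk.injEq] at hgs
          rcases hgs with ⟨h, _⟩ | h
          · omega
          · have := ih (j + 1) hm' (g, sg) h
            dsimp only at this
            push_cast at this
            omega

theorem pvP_ge_one (limit : Int) :
    ∀ gs ∈ pvPentsLoop limit [] 0, (1 : Int) ≤ gs.1 := by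
  intro gs hgs
  have := pvPentsLoop_ge limit ((limit + 1 - pvPentA 1).toNat) 0 le_rfl gs hgs
  have h1 : pvPentA ((0 : Nat) + 1 : Int) = 1 := by norm_num [pvPentA_one]
  omega

theorem pvFoldl_noop (pb : List Int) (n : Int) (l : List (Int × Int)) (t : Int)
    (h : ∀ gs ∈ l, n < gs.1) :
    List.foldl
      (fun t gs => if gs.1 ≤ n then t + gs.2 * PySem.List.pyGetD pb (n - gs.1) 0 else t) t l
      = t := by
  induction l generalizing t with
  | nil => rfl
  | cons a l ihl =>
      have ha : ¬ a.1 ≤ n := by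
        have := h a (List.mem_cons_self)
        omega
      simp only [List.foldl_cons, ha, if_false, ite_false]
      exact ihl t (fun gs hgs => h gs (List.mem_cons_of_mem a hgs))

theorem pvInner_eq (pa pb : List Int) (limit n : Int) (hn : 0 < n) (hnl : n ≤ limit)
    (hread : ∀ i : Int, 0 ≤ i → i < n →
      PySem.List.pyGetD pa i 0 = PySem.List.pyGetD pb i 0) :
    ∀ (m : Nat) (j : Nat) (t : Int),
      (limit + 1 - pvPentA ((j : Int) + 1)).toNat ≤ m →
      List.foldl
        (fun t gs => if gs.1 ≤ n then t + gs.2 * PySem.List.pyGetD pb (n - gs.1) 0 else t) t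
        (pvPentsLoop limit [] j)
        = pvAWhile pa n t (pvSgn j) j := by
  intro m
  induction m with
  | zero =>
      intro j t hm
      have hb : PySem.Int.floordiv (((j : Int) + 1) * (3 * ((j : Int) + 1) - 1)) 2
          = pvPentA ((j : Int) + 1) := rfl
      have h1 : PySem.Int.floordiv (((j : Int) + 1) * (3 * ((j : Int) + 1) - 1)) 2 > limit := by
        omega
      rw [pvPentsLoop]
      rw [pvAWhile]
      have hgt : pvPentA ((j : Int) + 1) > n := by omega
      simp only [h1, hgt, if_true, ite_true, List.foldl_nil]
  | succ m ih =>
      intro j t hm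
      have hb : PySem.Int.floordiv (((j : Int) + 1) * (3 * ((j : Int) + 1) - 1)) 2
          = pvPentA ((j : Int) + 1) := rfl
      have hp1 := pvPentA_ge_one j
      by_cases h1 : PySem.Int.floordiv (((j : Int) + 1) * (3 * ((j : Int) + 1) - 1)) 2 > limit
      · rw [pvPentsLoop]
        rw [pvAWhile]
        have hgt : pvPentA ((j : Int) + 1) > n := by omega
        simp only [h1, hgt, if_true, ite_true, List.foldl_nil]
      · have hs := pvPentA_succ ((j : Int) + 1)
        have hq := pvPentA_neg_eq ((j : Int) + 1)
        have hqv := pvPentA_neg_val ((j : Int) + 1)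
        have hm' : (limit + 1 - pvPentA (((j + 1 : Nat) : Int) + 1)).toNat ≤ m := by
          push_cast
          omega
        by_cases hpn : pvPentA ((j : Int) + 1) > n
        · -- first pentagonal already exceeds n: every entry of the list exceeds n
          rw [pvAWhile]
          simp only [hpn, if_true, ite_true]
          exact pvFoldl_noop pb n _ t
            (fun gs hgs => by
              have := pvPentsLoop_ge limit (m + 1) j hm gs hgs
              omega)
        · rw [pvPentsLoop]
          rw [pvAWhile]
          simp only [h1, hpn, if_false, ite_false]
          rw [pvPentsLoop_acc limit m _ _ hm']
          have hle : pvPentA ((j : Int) + 1) ≤ n := by omega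
          have hr1 := hread (n - pvPentA ((j : Int) + 1)) (by omega) (by omega)
          by_cases h2 : PySem.Int.floordiv (((j : Int) + 1) * (3 * ((j : Int) + 1) + 1)) 2 ≤ limit
          · simp only [h2, if_true, ite_true]
            by_cases hqn : pvPentA (-((j : Int) + 1)) > n
            · -- second entry present but filtered out, tail entries all exceed n
              simp only [hqn, if_true, ite_true, List.nil_append, List.foldl_append,
                List.foldl_cons, List.foldl_nil, pvSgn_eq, hb, hle, if_true, ite_true]
              have hq2 : ¬ PySem.Int.floordiv (((j : Int) + 1) * (3 * ((j : Int) + 1) + 1)) 2 ≤ n := by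
                omega
              simp only [hq2, if_false, ite_false]
              rw [hr1]
              exact pvFoldl_noop pb n _ _
                (fun gs hgs => by
                  have := pvPentsLoop_ge limit m (j + 1) hm' gs hgs
                  push_cast at this
                  omega)
            · simp only [hqn, if_false, ite_false, List.nil_append, List.foldl_append,
                List.foldl_cons, List.foldl_nil, pvSgn_eq, hb, hle, if_true, ite_true]
              have hq2 : PySem.Int.floordiv (((j : Int) + 1) * (3 * ((j : Int) + 1) + 1)) 2 ≤ n := by
                omega
              have hr2 := hread (n - pvPentA (-((j : Int) + 1))) (by omega) (by omega)
              simp only [hq2, if_true, ite_true]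
              rw [hr1, ← hq, hr2, pvSgn_succ]
              have := ih (j + 1)
                (t + pvSgn j * PySem.List.pyGetD pb (n - pvPentA ((j : Int) + 1)) 0
                   + pvSgn j * PySem.List.pyGetD pb (n - pvPentA (-((j : Int) + 1))) 0) hm'
              push_cast at this ⊢
              rw [← this]
          · -- second pentagonal exceeds limit: not appended, and it also exceeds n
            simp only [h2, if_false, ite_false]
            have hqn : pvPentA (-((j : Int) + 1)) > n := by omega
            simp only [hqn, if_true, ite_true, List.nil_append, List.foldl_append,
              List.foldl_cons, List.foldl_nil, pvSgn_eq, hb, hle, if_true, ite_true]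
            rw [hr1]
            exact pvFoldl_noop pb n _ _
              (fun gs hgs => by
                have := pvPentsLoop_ge limit m (j + 1) hm' gs hgs
                push_cast at this
                omega)

theorem pvSet_mid (pb : List Int) (x : Int) (rest : List Int) (r : Int) :
    (pb ++ x :: rest).set pb.length r = pb ++ r :: rest := by
  induction pb with
  | nil => rfl
  | cons a l ih => simp [List.set, ih]

theorem pvRead_append (pb rest : List Int) (i : Int) (h0 : 0 ≤ i) (h : i.toNat < pb.length) :
    PySem.List.pyGetD (pb ++ rest) i 0 = PySem.List.pyGetD pb i 0 := by
  rw [PySem.List.pyGetD_eq_getElem (pb ++ rest) 0 h0 (by simp; omega),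
      PySem.List.pyGetD_eq_getElem pb 0 h0 (by omega)]
  exact List.getElem_append_left h

theorem pvRead_mid (pb : List Int) (r : Int) (rest : List Int) (i : Int)
    (h0 : 0 ≤ i) (h : i.toNat = pb.length) :
    PySem.List.pyGetD (pb ++ r :: rest) i 0 = r := by
  rw [PySem.List.pyGetD_eq_getElem (pb ++ r :: rest) 0 h0 (by simp; omega)]
  rw [List.getElem_append_right (by omega)]
  simp [h]

-- ----- scatter side -----

-- one guarded update of the pending array (the body of B's scatter, per offset)
def pvGUpd (limit src val : Int) (pd : List Int) (gs : Int × Int) : List Int :=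
  if src + gs.1 ≤ limit then
    PySem.List.pySetD pd (src + gs.1) (PySem.List.pyGetD pd (src + gs.1) 0 + gs.2 * val)
  else pd

theorem pvGUpd_pos (limit src val : Int) (pd : List Int) (g s : Int) (h : src + g ≤ limit) :
    pvGUpd limit src val pd (g, s)
      = PySem.List.pySetD pd (src + g) (PySem.List.pyGetD pd (src + g) 0 + s * val) := by
  unfold pvGUpd
  exact if_pos h

theorem pvGUpd_neg (limit src val : Int) (pd : List Int) (g s : Int) (h : ¬ src + g ≤ limit) :
    pvGUpd limit src val pd (g, s) = pd := by
  unfold pvGUpd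
  exact if_neg h

theorem pvRead_set (pd : List Int) (p v i : Int) (h0p : 0 ≤ p) (hp : p.toNat < pd.length)
    (h0i : 0 ≤ i) (hi : i.toNat < pd.length) :
    PySem.List.pyGetD (PySem.List.pySetD pd p v) i 0
      = if i = p then v else PySem.List.pyGetD pd i 0 := by
  rw [PySem.List.pySetD_of_nonneg _ _ h0p]
  rw [PySem.List.pyGetD_eq_getElem _ 0 h0i (by simp [List.length_set]; omega)]
  rw [List.getElem_set]
  by_cases h : i = p
  · simp [h]
  · have h' : ¬ p.toNat = i.toNat := by omega
    simp only [h', if_false, ite_false, h]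
    rw [PySem.List.pyGetD_eq_getElem _ 0 h0i (by omega)]

theorem pvGUpd_len (limit src val : Int) (pd : List Int) (gs : Int × Int)
    (h0 : 0 ≤ src + gs.1) :
    (pvGUpd limit src val pd gs).length = pd.length := by
  unfold pvGUpd
  split_ifs with h
  · rw [PySem.List.pySetD_of_nonneg _ _ h0]
    exact List.length_set ..
  · rfl

theorem pvGFold_len (limit src val : Int) (l : List (Int × Int))
    (hg : ∀ gs ∈ l, (1 : Int) ≤ gs.1) (hsrc : 0 ≤ src) :
    ∀ pd : List Int, (List.foldl (pvGUpd limit src val) pd l).length = pd.length := by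
  induction l with
  | nil => intro pd; rfl
  | cons a l ih =>
      intro pd
      rw [List.foldl_cons]
      rw [ih (fun gs hgs => hg gs (List.mem_cons_of_mem a hgs))]
      exact pvGUpd_len limit src val pd a
        (by have := hg a List.mem_cons_self; omega)

theorem pvGFold_noop (limit src val : Int) (l : List (Int × Int))
    (h : ∀ gs ∈ l, limit - src < gs.1) :
    ∀ pd : List Int, List.foldl (pvGUpd limit src val) pd l = pd := by
  induction l with
  | nil => intro pd; rfl
  | cons a l ih =>
      intro pd
      rw [List.foldl_cons]
      have ha : ¬ src + a.1 ≤ limit := by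
        have := h a List.mem_cons_self
        omega
      rw [show pvGUpd limit src val pd a = pd by unfold pvGUpd; simp [ha]]
      exact ih (fun gs hgs => h gs (List.mem_cons_of_mem a hgs)) pd

theorem pvGFold_read (limit src val : Int) (hsrc : 0 ≤ src) :
    ∀ (l : List (Int × Int)) (pd : List Int) (i : Int),
      (∀ gs ∈ l, (1 : Int) ≤ gs.1) →
      pd.length = (limit + 1).toNat →
      0 ≤ i → i ≤ limit →
      PySem.List.pyGetD (List.foldl (pvGUpd limit src val) pd l) i 0
        = PySem.List.pyGetD pd i 0
          + (l.map (fun gs => if src + gs.1 = i ∧ src + gs.1 ≤ limit then gs.2 * val else 0)).sum := by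
  intro l
  induction l with
  | nil => intro pd i _ _ _ _; simp
  | cons a l ih =>
      intro pd i hg hlen h0i hil
      have ha1 : (1 : Int) ≤ a.1 := hg a List.mem_cons_self
      have hlim : 0 ≤ limit := by omega
      rw [List.foldl_cons]
      rw [ih (pvGUpd limit src val pd a) i (fun gs hgs => hg gs (List.mem_cons_of_mem a hgs))
          (by rw [pvGUpd_len limit src val pd a (by omega)]; exact hlen) h0i hil]
      have hread : PySem.List.pyGetD (pvGUpd limit src val pd a) i 0
          = PySem.List.pyGetD pd i 0
            + (if src + a.1 = i ∧ src + a.1 ≤ limit then a.2 * val else 0) := by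
        unfold pvGUpd
        by_cases hle : src + a.1 ≤ limit
        · rw [if_pos hle]
          rw [pvRead_set pd (src + a.1) _ i (by omega) (by omega) h0i (by omega)]
          by_cases he : i = src + a.1
          · rw [if_pos he, if_pos (⟨he.symm, hle⟩ : src + a.1 = i ∧ src + a.1 ≤ limit), he]
          · have he' : ¬ (src + a.1 = i ∧ src + a.1 ≤ limit) := by
              intro hcontra; exact he hcontra.1.symm
            rw [if_neg he, if_neg he', add_zero]
        · have he' : ¬ (src + a.1 = i ∧ src + a.1 ≤ limit) := by
            intro hcontra; exact hle hcontra.2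
          rw [if_neg hle, if_neg he', add_zero]
      rw [hread]
      simp only [List.map_cons, List.sum_cons]
      ring

-- B's scatter loop equals the guarded fold over the ghost pentagonal list
theorem pvScatter_eq (limit src val : Int) (hsrc : 0 ≤ src) :
    ∀ (m : Nat) (j : Nat) (pd : List Int),
      (limit + 1 - pvPentA ((j : Int) + 1)).toNat ≤ m →
      List.foldl (pvGUpd limit src val) pd (pvPentsLoop limit [] j)
        = pvScatter limit pd src val (pvSgn j) (pvPentA ((j : Int) + 1)) j := by
  intro m
  induction m with
  | zero =>
      intro j pd hm
      have hb : PySem.Int.floordiv (((j : Int) + 1) * (3 * ((j : Int) + 1) - 1)) 2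
          = pvPentA ((j : Int) + 1) := rfl
      have h1 : PySem.Int.floordiv (((j : Int) + 1) * (3 * ((j : Int) + 1) - 1)) 2 > limit := by
        omega
      rw [pvPentsLoop, pvScatter]
      have hgt : ¬ src + pvPentA ((j : Int) + 1) ≤ limit := by omega
      simp only [h1, hgt, if_true, ite_true, if_false, ite_false, List.foldl_nil]
  | succ m ih =>
      intro j pd hm
      have hb : PySem.Int.floordiv (((j : Int) + 1) * (3 * ((j : Int) + 1) - 1)) 2
          = pvPentA ((j : Int) + 1) := rfl
      by_cases h1 : PySem.Int.floordiv (((j : Int) + 1) * (3 * ((j : Int) + 1) - 1)) 2 > limit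
      · rw [pvPentsLoop, pvScatter]
        have hgt : ¬ src + pvPentA ((j : Int) + 1) ≤ limit := by omega
        simp only [h1, hgt, if_true, ite_true, if_false, ite_false, List.foldl_nil]
      · have hs := pvPentA_succ ((j : Int) + 1)
        have hq := pvPentA_neg_eq ((j : Int) + 1)
        have hqv := pvPentA_neg_val ((j : Int) + 1)
        have hm' : (limit + 1 - pvPentA (((j + 1 : Nat) : Int) + 1)).toNat ≤ m := by
          push_cast
          omega
        have hsgn : -pvSgn j = pvSgn (j + 1) := by
          rw [← pvSgn_succ]; ring
        have hgnext : pvPentA ((j : Int) + 1) + 3 * ((j : Int) + 1) + 1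
            = pvPentA ((j : Int) + 1 + 1) := (pvPentA_succ _).symm
        have ihs := ih (j + 1)
        push_cast at ihs
        have hms : (limit + 1 - pvPentA ((j : Int) + 1 + 1)).toNat ≤ m := by
          push_cast at hm'
          exact hm'
        by_cases hc : src + pvPentA ((j : Int) + 1) ≤ limit
        · rw [pvPentsLoop, pvScatter]
          simp only [h1, hc, if_false, ite_false, if_true, ite_true]
          rw [pvPentsLoop_acc limit m _ _ hm']
          simp only [← hqv, ← hq, hb, pvSgn_eq]
          by_cases h2p : pvPentA (-((j : Int) + 1)) ≤ limit
          · simp only [h2p, if_true, ite_true, List.nil_append, List.foldl_append,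
              List.foldl_cons, List.foldl_nil]
            rw [pvGUpd_pos limit src val pd _ _ hc]
            by_cases hd : src + pvPentA (-((j : Int) + 1)) ≤ limit
            · rw [pvGUpd_pos limit src val _ _ _ hd]
              rw [if_pos hd, hsgn, hgnext]
              exact ihs _ hms
            · rw [pvGUpd_neg limit src val _ _ _ hd]
              rw [if_neg hd, hsgn, hgnext]
              exact ihs _ hms
          · -- second pentagonal exceeds limit: absent from list, and scatter skips it too
            simp only [h2p, if_false, ite_false, List.nil_append, List.foldl_append,
              List.foldl_cons, List.foldl_nil]
            rw [pvGUpd_pos limit src val pd _ _ hc]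
            have hd : ¬ src + pvPentA (-((j : Int) + 1)) ≤ limit := by omega
            rw [if_neg hd, hsgn, hgnext]
            exact ihs _ hms
        · -- src + first pentagonal beyond limit: scatter stops; every guarded update is a no-op
          rw [pvScatter]
          simp only [hc, if_false, ite_false]
          exact pvGFold_noop limit src val _
            (fun gs hgs => by
              have := pvPentsLoop_ge limit (m + 1) j hm gs hgs
              omega) pd

-- the invariant value: pending[i] after scattering p(0..n-1) (pb holds those residues)
def pvT (limit : Int) (pb : List Int) (n i : Int) : Int :=
  ((pvPentsLoop limit [] 0).map
    (fun gs => if i - n < gs.1 ∧ gs.1 ≤ i then gs.2 * PySem.List.pyGetD pb (i - gs.1) 0 else 0)).sum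

theorem pvFold_if_sum (pb : List Int) (n : Int) (l : List (Int × Int)) :
    ∀ t : Int,
      List.foldl
        (fun t gs => if gs.1 ≤ n then t + gs.2 * PySem.List.pyGetD pb (n - gs.1) 0 else t) t l
        = t + (l.map
            (fun gs => if gs.1 ≤ n then gs.2 * PySem.List.pyGetD pb (n - gs.1) 0 else 0)).sum := by
  induction l with
  | nil => intro t; simp
  | cons a l ih =>
      intro t
      rw [List.foldl_cons, List.map_cons, List.sum_cons, ih]
      by_cases hc : a.1 ≤ n
      · rw [if_pos hc, if_pos hc]; ring_nf
      · rw [if_neg hc, if_neg hc]; ring_nf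

theorem pvT_at_self (limit : Int) (pb : List Int) (n : Int) (hn : 0 < n) (hnl : n ≤ limit)
    (rest : List Int)
    (hlen : pb.length = n.toNat) :
    pvAWhile (pb ++ rest) n 0 1 0 = pvT limit pb n n := by
  have hread : ∀ i : Int, 0 ≤ i → i < n →
      PySem.List.pyGetD (pb ++ rest) i 0 = PySem.List.pyGetD pb i 0 := by
    intro i h0 hi
    exact pvRead_append pb rest i h0 (by omega)
  have h := pvInner_eq (pb ++ rest) pb limit n hn hnl hread
    ((limit + 1 - pvPentA 1).toNat) 0 0 (by norm_num)
  have hsg : pvSgn 0 = 1 := rfl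
  rw [hsg] at h
  rw [← h]
  unfold pvT
  rw [pvFold_if_sum pb n (pvPentsLoop limit [] 0) 0, zero_add]
  refine congrArg List.sum (List.map_congr_left ?_)
  intro gs hgs
  have h1 := pvP_ge_one limit gs hgs
  by_cases hc : gs.1 ≤ n
  · rw [if_pos hc, if_pos (⟨by omega, hc⟩ : n - n < gs.1 ∧ gs.1 ≤ n)]
  · rw [if_neg hc, if_neg (fun hcontra => hc hcontra.2)]

theorem pvSum_map_split (l : List (Int × Int)) (f g h : Int × Int → Int)
    (hfg : ∀ x ∈ l, f x = g x + h x) :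
    (l.map f).sum = (l.map g).sum + (l.map h).sum := by
  induction l with
  | nil => simp
  | cons a l ih =>
      simp only [List.map_cons, List.sum_cons]
      rw [hfg a List.mem_cons_self,
          ih (fun x hx => hfg x (List.mem_cons_of_mem a hx))]
      ring

theorem pvT_step (limit : Int) (pb : List Int) (n i r : Int)
    (hlen : pb.length = n.toNat) (hn : 1 ≤ n) (h0i : 0 ≤ i) (hil : i ≤ limit) :
    pvT limit (pb ++ [r]) (n + 1) i
      = pvT limit pb n i
        + ((pvPentsLoop limit [] 0).map
            (fun gs => if n + gs.1 = i ∧ n + gs.1 ≤ limit then gs.2 * r else 0)).sum := by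
  unfold pvT
  apply pvSum_map_split
  intro gs hgs
  have hg1 := pvP_ge_one limit gs hgs
  by_cases he : gs.1 = i - n
  · have hi : i = n + gs.1 := by omega
    have hc1 : i - (n + 1) < gs.1 ∧ gs.1 ≤ i := ⟨by omega, by omega⟩
    have hc2 : ¬ (i - n < gs.1 ∧ gs.1 ≤ i) := by omega
    have hc3 : n + gs.1 = i ∧ n + gs.1 ≤ limit := ⟨by omega, by omega⟩
    rw [if_pos hc1, if_neg hc2, if_pos hc3, zero_add]
    rw [show pb ++ [r] = pb ++ r :: [] by rfl]
    rw [pvRead_mid pb r [] (i - gs.1) (by omega) (by omega)]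
  · have hc3 : ¬ (n + gs.1 = i ∧ n + gs.1 ≤ limit) := by omega
    by_cases hc : i - n < gs.1 ∧ gs.1 ≤ i
    · have hc1 : i - (n + 1) < gs.1 ∧ gs.1 ≤ i := ⟨by omega, hc.2⟩
      rw [if_pos hc1, if_pos hc, if_neg hc3, add_zero]
      rw [pvRead_append pb [r] (i - gs.1) (by omega) (by omega)]
    · have hc1 : ¬ (i - (n + 1) < gs.1 ∧ gs.1 ≤ i) := by omega
      rw [if_neg hc1, if_neg hc, if_neg hc3, add_zero]

-- the outer loops agree, given the scatter invariant
theorem pvOuter (limit modulo : Int) :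
    ∀ (m : Nat) (n : Int) (pb pending : List Int), 1 ≤ n →
      (limit + 1 - n).toNat ≤ m →
      pb.length = n.toNat →
      pending.length = (limit + 1).toNat →
      (∀ i : Int, 0 ≤ i → i ≤ limit →
        PySem.List.pyGetD pending i 0 = pvT limit pb n i) →
      pvALoop limit modulo (pb ++ List.replicate (limit + 1 - n).toNat 0) n
        = pvBLoop limit modulo pending n := by
  intro m
  induction m with
  | zero =>
      intro n pb pending hn hm hlen hplen hinv
      have hng : n > limit := by omega
      rw [pvALoop, pvBLoop]
      simp only [hng, if_true, ite_true]
  | succ m ih =>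
      intro n pb pending hn hm hlen hplen hinv
      by_cases hng : n > limit
      · rw [pvALoop, pvBLoop]
        simp only [hng, if_true, ite_true]
      · have hnl : n ≤ limit := by omega
        have hrep : List.replicate (limit + 1 - n).toNat (0 : Int)
            = 0 :: List.replicate (limit + 1 - (n + 1)).toNat 0 := by
          have h : (limit + 1 - n).toNat = (limit + 1 - (n + 1)).toNat + 1 := by omega
          rw [h, List.replicate_succ]
        have hsum : pvAWhile (pb ++ List.replicate (limit + 1 - n).toNat 0) n 0 1 0
            = pvT limit pb n n :=
          pvT_at_self limit pb n (by omega) hnl _ hlen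
        rw [pvALoop, pvBLoop]
        simp only [hng, if_false, ite_false]
        rw [hsum, hinv n (by omega) hnl]
        set r := PySem.Int.mod (pvT limit pb n n) modulo with hr_def
        have hset : PySem.List.pySetD (pb ++ List.replicate (limit + 1 - n).toNat 0) n r
            = pb ++ r :: List.replicate (limit + 1 - (n + 1)).toNat 0 := by
          rw [PySem.List.pySetD_of_nonneg _ _ (by omega), hrep]
          have h : n.toNat = pb.length := by omega
          rw [h]
          exact pvSet_mid pb 0 _ _
        rw [hset]
        have hget : PySem.List.pyGetD
            (pb ++ r :: List.replicate (limit + 1 - (n + 1)).toNat 0) n 0 = r :=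
          pvRead_mid pb _ _ n (by omega) (by omega)
        rw [hget]
        by_cases hr : r = 0
        · simp only [hr, beq_self_eq_true, if_true, ite_true]
        · have hb : (r == 0) = false := by simp [hr]
          simp only [hb, if_false, ite_false, Bool.false_eq_true]
          have hshape : pb ++ r :: List.replicate (limit + 1 - (n + 1)).toNat 0
              = (pb ++ [r]) ++ List.replicate (limit + 1 - (n + 1)).toNat 0 := by
            simp
          rw [hshape]
          -- the scatter from n with value r preserves the invariant at n + 1
          have hscat : pvScatter limit pending n r 1 1 0
              = List.foldl (pvGUpd limit n r) pending (pvPentsLoop limit [] 0) := by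
            have h := pvScatter_eq limit n r (by omega) ((limit + 1 - pvPentA 1).toNat) 0
              pending (by norm_num)
            have h1 : pvPentA (((0 : Nat) : Int) + 1) = 1 := by norm_num [pvPentA_one]
            rw [h1] at h
            have h2 : pvSgn 0 = 1 := rfl
            rw [h2] at h
            exact h.symm
          rw [hscat]
          apply ih (n + 1) (pb ++ [r]) _ (by omega) (by omega) (by simp; omega)
          · rw [pvGFold_len limit n r _ (pvP_ge_one limit) (by omega)]
            exact hplen
          · intro i h0i hil
            rw [pvGFold_read limit n r (by omega) _ pending i (pvP_ge_one limit) hplen h0i hil]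
            rw [hinv i h0i hil]
            exact (pvT_step limit pb n i r hlen hn h0i hil).symm

theorem pvInit_read (limit : Int) (hl : 0 ≤ limit) (i : Int) (h0i : 0 ≤ i) (hil : i ≤ limit) :
    PySem.List.pyGetD (pvScatter limit (List.replicate (limit + 1).toNat 0) 0 1 1 1 0) i 0
      = pvT limit [1] 1 i := by
  have hscat : pvScatter limit (List.replicate (limit + 1).toNat 0) 0 1 1 1 0
      = List.foldl (pvGUpd limit 0 1) (List.replicate (limit + 1).toNat 0)
          (pvPentsLoop limit [] 0) := by
    have h := pvScatter_eq limit 0 1 le_rfl ((limit + 1 - pvPentA 1).toNat) 0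
      (List.replicate (limit + 1).toNat 0) (by norm_num)
    have h1 : pvPentA (((0 : Nat) : Int) + 1) = 1 := by norm_num [pvPentA_one]
    rw [h1] at h
    have h2 : pvSgn 0 = 1 := rfl
    rw [h2] at h
    exact h.symm
  rw [hscat]
  rw [pvGFold_read limit 0 1 le_rfl _ _ i (pvP_ge_one limit) (by simp) h0i hil]
  have hz : PySem.List.pyGetD (List.replicate (limit + 1).toNat (0 : Int)) i 0 = 0 := by
    rw [PySem.List.pyGetD_eq_getElem _ 0 h0i (by simp; omega)]
    simp
  rw [hz, zero_add]
  unfold pvT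
  refine congrArg List.sum (List.map_congr_left ?_)
  intro gs hgs
  have hg1 := pvP_ge_one limit gs hgs
  by_cases he : gs.1 = i
  · have hc1 : i - 1 < gs.1 ∧ gs.1 ≤ i := by omega
    have hc2 : 0 + gs.1 = i ∧ 0 + gs.1 ≤ limit := by omega
    rw [if_pos hc1, if_pos hc2]
    have hz0 : i - gs.1 = 0 := by omega
    rw [hz0, PySem.List.pyGetD_zero_cons, mul_one]
  · have hc1 : ¬ (i - 1 < gs.1 ∧ gs.1 ≤ i) := by omega
    have hc2 : ¬ (0 + gs.1 = i ∧ 0 + gs.1 ≤ limit) := by omega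
    rw [if_neg hc1, if_neg hc2]

-- ===== VERDICT (by name: the statement is the Claim_ definition above) =====
theorem partition_function_spec : Claim_equal_partition_function := by
  intro limit modulo _ hpre
  unfold Spec_partition_function
  obtain ⟨hl, _⟩ := hpre
  unfold partition_function partition_function_alt
  have hinit : PySem.List.pySetD (List.replicate (limit + 1).toNat (0 : Int)) 0 1
      = [(1 : Int)] ++ List.replicate (limit + 1 - 1).toNat 0 := by
    rw [PySem.List.pySetD_of_nonneg _ _ (by norm_num)]
    have h1 : (limit + 1).toNat = (limit + 1 - 1).toNat + 1 := by omega
    rw [h1, List.replicate_succ]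
    simp
  rw [hinit]
  apply pvOuter limit modulo ((limit + 1 - 1).toNat) 1 [1] _ (by norm_num) (by omega) (by simp)
  · rw [show pvScatter limit (List.replicate (limit + 1).toNat 0) 0 1 1 1 0
        = List.foldl (pvGUpd limit 0 1) (List.replicate (limit + 1).toNat 0)
            (pvPentsLoop limit [] 0) from ?_]
    · rw [pvGFold_len limit 0 1 _ (pvP_ge_one limit) le_rfl]
      simp
    · have h := pvScatter_eq limit 0 1 le_rfl ((limit + 1 - pvPentA 1).toNat) 0
        (List.replicate (limit + 1).toNat 0) (by norm_num)
      have h1 : pvPentA (((0 : Nat) : Int) + 1) = 1 := by norm_num [pvPentA_one]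
      rw [h1] at h
      have h2 : pvSgn 0 = 1 := rfl
      rw [h2] at h
      exact h.symm
  · intro i h0i hil
    exact pvInit_read limit hl i h0i hil
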